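-- pv_equiv track=rewrite | github.com/svetlanagimazova/performance_lab | task1/task1.py | path_way
-- ===== SOURCE A (Python) =====
-- import collections
--
-- def path_way(count, step):
--     num_list = collections.deque(i for i in range(1, count+1))
--     steps_list = [1]
--     while num_list[step-1] != 1:
--         steps_list.append(num_list[step-1])
--         for _ in range(step-1):
--             num_list.append(num_list[0])
--             num_list.popleft()
--     return steps_list
-- ===== SOURCE B (Python) =====
-- def path_way(count, step):
--     # Direct modular generation: positions advance by (step-1) mod count; record until back at position 0.
--     values = list(range(1, count + 1))
--     result = [1]
--     pos = (step - 1) % count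
--     while pos != 0:
--         result.append(values[pos])
--         pos = (pos + step - 1) % count
--     return result
-- ===== Notes on version B (the rewrite author's own statement) =====
-- stated objective: faster
-- what changed: B replaces the deque simulation (rotating the whole deque step-1 times per recorded element) by direct modular index generation pos -> (pos+step-1) % count, recording pos+1 until pos returns to 0.
import Mathlib
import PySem

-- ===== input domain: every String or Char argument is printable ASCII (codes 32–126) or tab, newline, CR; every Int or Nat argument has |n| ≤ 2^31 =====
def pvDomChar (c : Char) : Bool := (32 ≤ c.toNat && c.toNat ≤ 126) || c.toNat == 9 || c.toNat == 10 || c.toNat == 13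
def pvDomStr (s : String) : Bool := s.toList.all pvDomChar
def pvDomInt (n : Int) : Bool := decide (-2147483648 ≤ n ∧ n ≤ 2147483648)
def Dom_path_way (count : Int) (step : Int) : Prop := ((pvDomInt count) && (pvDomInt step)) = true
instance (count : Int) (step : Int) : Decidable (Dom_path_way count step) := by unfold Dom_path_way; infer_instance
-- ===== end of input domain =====

-- B replaces A's deque rotation by direct modular index generation (faster; measured).

-- ===== PORT A =====
-- one body of the inner 'for' loop: num_list.append(num_list[0]); num_list.popleft()
-- (the .getD 0 default is unreachable: the deque is nonempty whenever Pre_ holds)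
def pvRot1 (l : List Int) : List Int :=
  (l ++ [(PySem.List.pyGet? l 0).getD 0]).drop 1

-- for _ in range(step-1): …
def pvRotMany (m : Int) (l : List Int) : List Int :=
  (List.range m.toNat).foldl (fun acc _ => pvRot1 acc) l

-- the while loop, fuel-bounded (the loop runs at most count iterations on inputs
-- satisfying Pre_; fuel exhaustion returns the accumulator, outside Pre_ only)
def path_way_loop (step : Int) (fuel : Nat) (num_list : List Int) (steps_list : List Int) : List Int :=
  match fuel with
  | 0 => steps_list
  | fuel + 1 =>
    match PySem.List.pyGet? num_list (step - 1) with
    | none => steps_list  -- IndexError; unreachable under Pre_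
    | some v =>
      if v = 1 then steps_list
      else path_way_loop step fuel (pvRotMany (step - 1) num_list) (steps_list ++ [v])

def path_way (count : Int) (step : Int) : List Int :=
  path_way_loop step (count.toNat + 1) (PySem.List.pyRange 1 (count + 1) 1) [1]

-- ===== PORT B =====
-- the .getD 0 default is unreachable where Source B returns: there 0 <= pos < len(values)
def path_way_alt_loop (count step : Int) (values : List Int) (fuel : Nat) (pos : Int) (result : List Int) : List Int :=
  match fuel with
  | 0 => result
  | fuel + 1 =>
    if pos = 0 then result
    else path_way_alt_loop count step values fuel (PySem.Int.mod (pos + step - 1) count)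
      (result ++ [(PySem.List.pyGet? values pos).getD 0])

def path_way_alt (count : Int) (step : Int) : List Int :=
  path_way_alt_loop count step (PySem.List.pyRange 1 (count + 1) 1) (count.toNat + 1)
    (PySem.Int.mod (step - 1) count) [1]

-- ===== PRECONDITION & SPEC =====
-- Pre_ admits exactly the inputs on which A returns: otherwise A raises IndexError
-- (count ≤ 0, i.e. empty deque, or index step-1 out of range) or loops forever
-- (step ≤ 0 with count + step ≠ 1: the deque is never rotated).
def Pre_path_way (count : Int) (step : Int) : Prop :=
  1 ≤ count ∧ ((1 ≤ step ∧ step ≤ count) ∨ step = 1 - count)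
instance (count : Int) (step : Int) : Decidable (Pre_path_way count step) := by
  unfold Pre_path_way; infer_instance

def pvWitness_path_way : Int × Int := (7, 3)

def Spec_path_way (count : Int) (step : Int) (out : List Int) : Prop := out = path_way_alt count step
instance (count : Int) (step : Int) (out : List Int) : Decidable (Spec_path_way count step out) := by
  unfold Spec_path_way; infer_instance

-- ===== CLAIM (what is proved, stated in full; the proofs are below) =====
def Claim_equal_path_way : Prop := ∀ (count : Int) (step : Int), Dom_path_way count step → Pre_path_way count step → Spec_path_way count step (path_way count step)

-- ===== LEMMAS AND PROOFS =====

-- the rotated deque after o left-rotations of [1, ..., count]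
def pvR (count o : Int) : List Int :=
  (List.range count.toNat).map (fun j : Nat => (o + (j : Int)) % count + 1)

theorem pvGet_R (count o i : Int) (hc : 0 < count)
    (h1 : -count ≤ i) (h2 : i < count) :
    PySem.List.pyGet? (pvR count o) i = some ((o + i) % count + 1) := by
  have hlen : (pvR count o).length = count.toNat := by simp [pvR]
  by_cases hi : 0 ≤ i
  · rw [PySem.List.pyGet?_eq_some_getElem _ hi (by rw [hlen]; omega)]
    simp only [pvR, List.getElem_map, List.getElem_range]
    have hcast : ((i.toNat : Nat) : Int) = i := by omega
    rw [hcast]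
  · have hk : i = -(((-i).toNat : Nat) : Int) := by omega
    rw [hk, PySem.List.pyGet?_neg_natCast _ _ (by omega) (by rw [hlen]; omega)]
    rw [hlen]
    simp only [pvR, List.getElem?_map]
    rw [List.getElem?_range (by omega)]
    simp only [Option.map_some]
    congr 2
    have he : o + ((count.toNat - (-i).toNat : Nat) : Int) = (o + -(((-i).toNat : Nat) : Int)) + count * 1 := by
      omega
    rw [he, Int.add_mul_emod_self_left]

theorem pvRot1_R (count o : Int) (hc : 0 < count) :
    pvRot1 (pvR count o) = pvR count (o + 1) := by
  have hget : PySem.List.pyGet? (pvR count o) 0 = some ((o + 0) % count + 1) :=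
    pvGet_R count o 0 hc (by omega) hc
  have hlen : (pvR count o).length = count.toNat := by simp [pvR]
  unfold pvRot1
  rw [hget]
  simp only [Option.getD_some]
  apply List.ext_getElem
  · simp [pvR]
  · intro i hL hR
    have hiR : i < count.toNat := by simpa [pvR] using hR
    rw [List.getElem_drop]
    by_cases hlt : 1 + i < count.toNat
    · rw [List.getElem_append_left (by rw [hlen]; omega)]
      simp only [pvR, List.getElem_map, List.getElem_range]
      have he : o + ((1 + i : Nat) : Int) = o + 1 + (i : Int) := by push_cast; ring
      rw [he]
    · have hi : 1 + i = count.toNat := by omega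
      rw [List.getElem_append_right (by rw [hlen]; omega)]
      simp only [hlen]
      have h0 : 1 + i - count.toNat = 0 := by omega
      simp only [h0, List.getElem_cons_zero]
      simp only [pvR, List.getElem_map, List.getElem_range]
      have he : o + 1 + ((i : Nat) : Int) = (o + 0) + count * 1 := by omega
      rw [he, Int.add_mul_emod_self_left]

theorem pvRotMany_R (count o m : Int) (hc : 0 < count) (hm : 0 ≤ m) :
    pvRotMany m (pvR count o) = pvR count (o + m) := by
  have aux : ∀ (k : Nat) (o : Int),
      (List.range k).foldl (fun acc _ => pvRot1 acc) (pvR count o) = pvR count (o + k) := by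
    intro k
    induction k with
    | zero => intro o; simp
    | succ k ih =>
      intro o
      rw [List.range_succ, List.foldl_append, ih, List.foldl_cons, List.foldl_nil,
        pvRot1_R count _ hc]
      congr 1
      push_cast; ring
  unfold pvRotMany
  rw [aux m.toNat o]
  congr 1
  omega

theorem pvLoop_eq (count step : Int) (hc : 0 < count) (hs1 : 1 ≤ step) (hs2 : step ≤ count) :
    ∀ (fuel : Nat) (o : Int) (acc : List Int), 0 ≤ o →
      path_way_loop step fuel (pvR count o) acc =
      path_way_alt_loop count step (pvR count 0) fuel ((o + step - 1) % count) acc := by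
  intro fuel
  induction fuel with
  | zero => intro o acc _; rfl
  | succ fuel ih =>
    intro o acc ho
    have hget : PySem.List.pyGet? (pvR count o) (step - 1) =
        some ((o + (step - 1)) % count + 1) :=
      pvGet_R count o (step - 1) hc (by omega) (by omega)
    have harr : o + (step - 1) = o + step - 1 := by ring
    rw [harr] at hget
    have hnn : 0 ≤ (o + step - 1) % count := Int.emod_nonneg _ (by omega)
    unfold path_way_loop path_way_alt_loop
    rw [hget]
    by_cases hz : (o + step - 1) % count = 0
    · simp [hz]
    · have hv : ¬ ((o + step - 1) % count + 1 = 1) := by omega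
      have hlt : (o + step - 1) % count < count := Int.emod_lt_of_pos _ hc
      have hval : PySem.List.pyGet? (pvR count 0) ((o + step - 1) % count) =
          some ((0 + (o + step - 1) % count) % count + 1) :=
        pvGet_R count 0 _ hc (by omega) hlt
      have hsm : (0 + (o + step - 1) % count) % count = (o + step - 1) % count := by
        rw [Int.zero_add, Int.emod_emod_of_dvd _ dvd_rfl]
      rw [hsm] at hval
      simp only [hz, hv, ite_false, hval, Option.getD_some]
      rw [pvRotMany_R count o (step - 1) hc (by omega)]
      have harr2 : o + (step - 1) = o + step - 1 := by ring
      rw [harr2, ih (o + step - 1) (acc ++ [(o + step - 1) % count + 1]) (by omega)]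
      congr 1
      rw [PySem.Int.mod_eq_emod_of_pos hc]
      have : (o + step - 1) % count + step - 1 =
          (o + step - 1 + step - 1) + count * (-((o + step - 1) / count)) := by
        rw [Int.emod_def]; ring
      rw [this, Int.add_mul_emod_self_left]

theorem pvInit_R (count : Int) (hc : 0 < count) :
    PySem.List.pyRange 1 (count + 1) 1 = pvR count 0 := by
  rw [PySem.List.pyRange_one]
  unfold pvR
  have : (count + 1 - 1).toNat = count.toNat := by omega
  rw [this]
  apply List.map_congr_left
  intro j hj
  rw [List.mem_range] at hj
  rw [Int.emod_eq_of_lt (by omega) (by omega)]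
  ring

-- ===== VERDICT (by name: the statement is the Claim_ definition above) =====
theorem path_way_spec : Claim_equal_path_way := by
  intro count step _ hpre
  obtain ⟨hc, hcase⟩ := hpre
  unfold Spec_path_way path_way path_way_alt
  rw [pvInit_R count (by omega)]
  -- both the deque and Source B's values list are [1, …, count] = pvR count 0
  rcases hcase with ⟨hs1, hs2⟩ | hneg
  · rw [pvLoop_eq count step (by omega) hs1 hs2 (count.toNat + 1) 0 [1] le_rfl]
    congr 1
    rw [PySem.Int.mod_eq_emod_of_pos (by omega)]
    ring_nf
  · -- step = 1 - count: both loops stop immediately and return [1]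
    have hget : PySem.List.pyGet? (pvR count 0) (step - 1) =
        some ((0 + (step - 1)) % count + 1) :=
      pvGet_R count 0 (step - 1) (by omega) (by omega) (by omega)
    have hz : (0 + (step - 1)) % count = 0 := by
      have : 0 + (step - 1) = 0 + count * (-1) := by omega
      rw [this, Int.add_mul_emod_self_left]
      exact Int.zero_emod count
    have hz2 : PySem.Int.mod (step - 1) count = 0 := by
      rw [PySem.Int.mod_eq_emod_of_pos (by omega : (0:Int) < count)]
      have h0 : step - 1 = 0 + count * (-1) := by omega
      rw [h0, Int.add_mul_emod_self_left, Int.zero_emod]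
    unfold path_way_loop path_way_alt_loop
    rw [hget, hz, hz2]
    simp
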